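-- pv_equiv track=rewrite | github.com/tirth23/python-practice | DP/Maxtipcalc.py | findmaxtip
-- ===== SOURCE A (Python) =====
-- def findmaxtip(a, b , x, y, n, ind):
--
--     sum1=sum2=0
--     if ind >= n:
--         return 0
--
--     if x > 0:
--         sum1 += a[ind] + findmaxtip(a, b, x-1, y, n, ind+1)
--
--     if y > 0:
--         sum2 += b[ind] + findmaxtip(a, b, x, y-1, n, ind+1)
--
--     return max(sum1, sum2)
-- ===== SOURCE B (Python) =====
-- def findmaxtip(a, b, x, y, n, ind):
--     X = x if x > 0 else 0
--     Y = y if y > 0 else 0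
--     H = n if n < ind + X + Y else ind + X + Y
--     nxt = []
--     nxtlo = 0
--     i = H - 1
--     while i >= ind:
--         d = i - ind
--         lo = d - Y if d - Y > 0 else 0
--         hi = d if d < X else X
--         av = a[i] if lo < X else 0
--         bv = b[i] if d - hi < Y else 0
--         cur = []
--         for k in range(lo, hi + 1):
--             j1 = k + 1 - nxtlo
--             s1 = av + (nxt[j1] if 0 <= j1 < len(nxt) else 0) if k < X else 0
--             j2 = k - nxtlo
--             s2 = bv + (nxt[j2] if 0 <= j2 < len(nxt) else 0) if d - k < Y else 0
--             cur.append(s1 if s1 > s2 else s2)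
--         nxt = cur
--         nxtlo = lo
--         i -= 1
--     return nxt[-nxtlo] if nxt else 0
-- ===== Notes on version B (the rewrite author's own statement) =====
-- stated objective: alternative
-- what changed: B replaces A's exponential branching recursion by an iterative bottom-up dynamic program over layers of reachable (picks-used, index) states, reusing each subproblem once.
import Mathlib
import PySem

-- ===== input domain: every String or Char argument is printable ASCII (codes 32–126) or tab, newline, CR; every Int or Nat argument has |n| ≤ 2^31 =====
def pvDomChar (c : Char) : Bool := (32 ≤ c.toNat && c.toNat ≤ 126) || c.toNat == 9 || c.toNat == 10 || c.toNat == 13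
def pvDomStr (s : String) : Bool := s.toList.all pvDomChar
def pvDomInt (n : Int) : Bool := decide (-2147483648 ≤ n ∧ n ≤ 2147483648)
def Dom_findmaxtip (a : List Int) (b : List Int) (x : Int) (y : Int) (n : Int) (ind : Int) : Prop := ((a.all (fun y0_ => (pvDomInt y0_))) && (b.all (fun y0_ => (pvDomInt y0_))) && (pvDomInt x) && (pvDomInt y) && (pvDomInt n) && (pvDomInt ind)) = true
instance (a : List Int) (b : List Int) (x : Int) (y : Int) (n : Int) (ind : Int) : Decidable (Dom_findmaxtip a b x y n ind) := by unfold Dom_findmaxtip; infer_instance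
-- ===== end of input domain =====

-- B replaces A's branching recursion by an iterative bottom-up layer DP over reachable states;
-- equal return values proved on Pre_ (exactly the inputs where the Python A returns without IndexError).

-- ===== PORT A =====
-- a[ind]/b[ind] ported as (pyGet? …).getD 0: exact wherever Python does not raise; Pre_ excludes the raising inputs.
def findmaxtip (a : List Int) (b : List Int) (x : Int) (y : Int) (n : Int) (ind : Int) : Int :=
  if _h : n ≤ ind then 0
  else
    let sum1 := if 0 < x then (PySem.List.pyGet? a ind).getD 0 + findmaxtip a b (x - 1) y n (ind + 1) else 0
    let sum2 := if 0 < y then (PySem.List.pyGet? b ind).getD 0 + findmaxtip a b x (y - 1) n (ind + 1) else 0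
    max sum1 sum2
termination_by (n - ind).toNat
decreasing_by all_goals omega

-- ===== PORT B =====
-- '(nxt[j] if 0 <= j < len(nxt) else 0)' of Source B
def fmtLayerVal (nxt : List Int) (j : Int) : Int :=
  if 0 ≤ j ∧ j < (nxt.length : Int) then (PySem.List.pyGet? nxt j).getD 0 else 0

-- the 'for k in range(lo, hi + 1): cur.append(...)' loop of Source B, one recursion step per k
def fmtBuild (X : Int) (Y : Int) (d : Int) (av : Int) (bv : Int) (nxtlo : Int) (nxt : List Int) (hi : Int) (k : Int) : List Int :=
  if _h : hi < k then []
  else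
    let s1 := if k < X then av + fmtLayerVal nxt (k + 1 - nxtlo) else 0
    let s2 := if d - k < Y then bv + fmtLayerVal nxt (k - nxtlo) else 0
    (if s2 < s1 then s1 else s2) :: fmtBuild X Y d av bv nxtlo nxt hi (k + 1)
termination_by (hi + 1 - k).toNat
decreasing_by all_goals omega

-- the 'while i >= ind' loop of Source B
def fmtLoop (a : List Int) (b : List Int) (ind : Int) (X : Int) (Y : Int) (i : Int) (nxt : List Int) (nxtlo : Int) : List Int × Int :=
  if _h : i < ind then (nxt, nxtlo)
  else
    let d := i - ind
    let lo := if 0 < d - Y then d - Y else 0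
    let hi := if d < X then d else X
    let av := if lo < X then (PySem.List.pyGet? a i).getD 0 else 0
    let bv := if d - hi < Y then (PySem.List.pyGet? b i).getD 0 else 0
    let cur := fmtBuild X Y d av bv nxtlo nxt hi lo
    fmtLoop a b ind X Y (i - 1) cur lo
termination_by (i - ind + 1).toNat
decreasing_by all_goals omega

def findmaxtip_alt (a : List Int) (b : List Int) (x : Int) (y : Int) (n : Int) (ind : Int) : Int :=
  let X := if 0 < x then x else 0
  let Y := if 0 < y then y else 0
  let H := if n < ind + X + Y then n else ind + X + Y
  let r := fmtLoop a b ind X Y (H - 1) [] 0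
  if r.1 = [] then 0 else (PySem.List.pyGet? r.1 (0 - r.2)).getD 0

-- ===== PRECONDITION & SPEC =====
-- Pre_ excludes exactly the inputs where the Python A raises IndexError: some index the
-- recursion actually reaches (ind .. min n (ind + budget) - 1) lies outside the two-ended
-- Python index range of a or of b.
def Pre_findmaxtip (a : List Int) (b : List Int) (x : Int) (y : Int) (n : Int) (ind : Int) : Prop :=
  n ≤ ind ∨
  ((x ≤ 0 ∨ (-(a.length : Int) ≤ ind ∧ min n (ind + x + max y 0) ≤ (a.length : Int))) ∧
   (y ≤ 0 ∨ (-(b.length : Int) ≤ ind ∧ min n (ind + y + max x 0) ≤ (b.length : Int))))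
instance (a : List Int) (b : List Int) (x : Int) (y : Int) (n : Int) (ind : Int) : Decidable (Pre_findmaxtip a b x y n ind) := by unfold Pre_findmaxtip; infer_instance

def pvWitness_findmaxtip : List Int × List Int × Int × Int × Int × Int := ([1, 2], [3, 4], 1, 1, 2, 0)

def Spec_findmaxtip (a : List Int) (b : List Int) (x : Int) (y : Int) (n : Int) (ind : Int) (out : Int) : Prop := out = findmaxtip_alt a b x y n ind
instance (a : List Int) (b : List Int) (x : Int) (y : Int) (n : Int) (ind : Int) (out : Int) : Decidable (Spec_findmaxtip a b x y n ind out) := by unfold Spec_findmaxtip; infer_instance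

-- ===== CLAIM (what is proved, stated in full; the proofs are below) =====
def Claim_equal_findmaxtip : Prop := ∀ (a : List Int) (b : List Int) (x : Int) (y : Int) (n : Int) (ind : Int), Dom_findmaxtip a b x y n ind → Pre_findmaxtip a b x y n ind → Spec_findmaxtip a b x y n ind (findmaxtip a b x y n ind)

-- ===== LEMMAS AND PROOFS =====

lemma ifmax (u v : Int) : (if v < u then u else v) = max u v := by
  by_cases h : v < u <;> simp [h] <;> omega

lemma f_zero (a b : List Int) (x' y' n i : Int) (h : n ≤ i ∨ (x' ≤ 0 ∧ y' ≤ 0)) :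
    findmaxtip a b x' y' n i = 0 := by
  rw [findmaxtip]
  rcases h with h | ⟨h1, h2⟩
  · simp [h]
  · by_cases hn : n ≤ i
    · simp [hn]
    · simp [hn, show ¬ 0 < x' by omega, show ¬ 0 < y' by omega]

lemma fmtLayerVal_nil (j : Int) : fmtLayerVal [] j = 0 := by
  simp [fmtLayerVal]

lemma fmtLayerVal_zero_cons (v : Int) (t : List Int) : fmtLayerVal (v :: t) 0 = v := by
  simp [fmtLayerVal]

lemma fmtLayerVal_cons (v : Int) (t : List Int) (j : Int) (h : 1 ≤ j) :
    fmtLayerVal (v :: t) j = fmtLayerVal t (j - 1) := by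
  have h0 : (0:Int) ≤ j := by omega
  have h1 : (0:Int) ≤ j - 1 := by omega
  simp only [fmtLayerVal, PySem.List.pyGet?_of_nonneg (v :: t) h0, PySem.List.pyGet?_of_nonneg t h1,
    List.length_cons]
  have hj : j.toNat = (j - 1).toNat + 1 := by omega
  rw [hj, List.getElem?_cons_succ]
  have hc : (0 ≤ j ∧ j < ((t.length : Int) + 1)) ↔ (0 ≤ j - 1 ∧ j - 1 < (t.length : Int)) := by
    constructor <;> intro hx <;> omega
  by_cases hr : 0 ≤ j - 1 ∧ j - 1 < (t.length : Int)
  · rw [if_pos (by push_cast; omega), if_pos hr]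
  · rw [if_neg (by push_cast; omega), if_neg hr]

lemma fmtBuild_val (X Y d av bv nxtlo : Int) (nxt : List Int) (hi : Int) :
    ∀ (m : ℕ) (k0 : Int), (hi + 1 - k0).toNat = m → ∀ k : Int, k0 ≤ k → k ≤ hi →
      fmtLayerVal (fmtBuild X Y d av bv nxtlo nxt hi k0) (k - k0) =
        (if (if d - k < Y then bv + fmtLayerVal nxt (k - nxtlo) else 0) <
            (if k < X then av + fmtLayerVal nxt (k + 1 - nxtlo) else 0)
         then (if k < X then av + fmtLayerVal nxt (k + 1 - nxtlo) else 0)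
         else (if d - k < Y then bv + fmtLayerVal nxt (k - nxtlo) else 0)) := by
  intro m
  induction m with
  | zero => intro k0 hm k hk1 hk2; omega
  | succ m ih =>
    intro k0 hm k hk1 hk2
    rw [fmtBuild, dif_neg (by omega : ¬ hi < k0)]
    by_cases hk0 : k = k0
    · subst hk0
      simp only [show k - k = (0:Int) by omega]
      rw [fmtLayerVal_zero_cons]
    · have h1 : (1:Int) ≤ k - k0 := by omega
      rw [fmtLayerVal_cons _ _ _ h1]
      have : k - k0 - 1 = k - (k0 + 1) := by omega
      rw [this]
      exact ih (k0 + 1) (by omega) k (by omega) hk2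

def InvL (a b : List Int) (x y n ind X Y : Int) (i : Int) (nxt : List Int) (lo0 : Int) : Prop :=
  ∀ k : Int, 0 ≤ k → i - ind - Y ≤ k → k ≤ i - ind → k ≤ X →
    fmtLayerVal nxt (k - lo0) = findmaxtip a b (x - k) (y - (i - ind - k)) n i

lemma invL_base (a b : List Int) (x y n ind X Y H : Int)
    (hX : X = if 0 < x then x else 0) (hY : Y = if 0 < y then y else 0)
    (hH : H = if n < ind + X + Y then n else ind + X + Y) (lo0 : Int) :
    InvL a b x y n ind X Y H [] lo0 := by
  intro k hk0 hk1 hk2 hk3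
  rw [fmtLayerVal_nil]
  refine (f_zero a b _ _ n H ?_).symm
  by_cases hc : n < ind + X + Y
  · left; omega
  · right
    have hHe : H = ind + X + Y := by omega
    constructor
    · have hxX : x ≤ X := by split_ifs at hX <;> omega
      have : X ≤ k := by omega
      omega
    · have hyY : y ≤ Y := by split_ifs at hY <;> omega
      have : Y ≤ H - ind - k := by omega
      omega

lemma invL_step (a b : List Int) (x y n ind X Y H : Int)
    (hX : X = if 0 < x then x else 0) (hY : Y = if 0 < y then y else 0)
    (hH : H = if n < ind + X + Y then n else ind + X + Y)
    (i : Int) (hi1 : ind ≤ i) (hi2 : i ≤ H - 1)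
    (nxt : List Int) (lo0 : Int)
    (hinv : InvL a b x y n ind X Y (i + 1) nxt lo0) :
    InvL a b x y n ind X Y i
      (fmtBuild X Y (i - ind)
        (if (if 0 < i - ind - Y then i - ind - Y else 0) < X then (PySem.List.pyGet? a i).getD 0 else 0)
        (if (i - ind) - (if i - ind < X then i - ind else X) < Y then (PySem.List.pyGet? b i).getD 0 else 0)
        lo0 nxt (if i - ind < X then i - ind else X) (if 0 < i - ind - Y then i - ind - Y else 0))
      (if 0 < i - ind - Y then i - ind - Y else 0) := by
  have hX0 : 0 ≤ X := by split_ifs at hX <;> omega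
  have hY0 : 0 ≤ Y := by split_ifs at hY <;> omega
  have hHn : H ≤ n := by split_ifs at hH <;> omega
  have hHb : H ≤ ind + X + Y := by split_ifs at hH <;> omega
  intro k hk0 hk1 hk2 hk3
  set d := i - ind with hd
  set lo : Int := if 0 < d - Y then d - Y else 0 with hlo
  set hi : Int := if d < X then d else X with hhi
  have hklo : lo ≤ k := by rw [hlo]; split_ifs <;> omega
  have hkhi : k ≤ hi := by rw [hhi]; split_ifs <;> omega
  rw [fmtBuild_val X Y d _ _ lo0 nxt hi (hi + 1 - lo).toNat lo rfl k hklo hkhi]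
  -- identify the two branch summands with the A-port's sums
  have hni : ¬ n ≤ i := by omega
  rw [findmaxtip, dif_neg hni]
  simp only []
  -- conditions
  have hxiff : (k < X) ↔ (0 < x - k) := by
    by_cases hx : 0 < x
    · rw [hX, if_pos hx]; omega
    · rw [hX, if_neg hx]; omega
  have hyiff : (d - k < Y) ↔ (0 < y - (d - k)) := by
    by_cases hy : 0 < y
    · rw [hY, if_pos hy]; omega
    · rw [hY, if_neg hy]; omega
  rw [ifmax]
  have hs1 : (if k < X then (if lo < X then (PySem.List.pyGet? a i).getD 0 else 0) + fmtLayerVal nxt (k + 1 - lo0) else 0)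
      = (if 0 < x - k then (PySem.List.pyGet? a i).getD 0 + findmaxtip a b (x - k - 1) (y - (d - k)) n (i + 1) else 0) := by
    by_cases hkX : k < X
    · rw [if_pos hkX, if_pos (hxiff.mp hkX), if_pos (by rw [hlo]; split_ifs <;> omega : lo < X)]
      have hrec := hinv (k + 1) (by omega) (by omega) (by omega) (by omega)
      rw [hrec]
      have e1 : x - (k + 1) = x - k - 1 := by omega
      have e2 : y - (i + 1 - ind - (k + 1)) = y - (d - k) := by omega
      rw [e1, e2]
    · rw [if_neg hkX, if_neg (fun hc => hkX (hxiff.mpr hc))]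
  have hs2 : (if d - k < Y then (if d - hi < Y then (PySem.List.pyGet? b i).getD 0 else 0) + fmtLayerVal nxt (k - lo0) else 0)
      = (if 0 < y - (d - k) then (PySem.List.pyGet? b i).getD 0 + findmaxtip a b (x - k) (y - (d - k) - 1) n (i + 1) else 0) := by
    by_cases hkY : d - k < Y
    · rw [if_pos hkY, if_pos (hyiff.mp hkY), if_pos (by rw [hhi]; split_ifs <;> omega : d - hi < Y)]
      have hrec := hinv k (by omega) (by omega) (by omega) (by omega)
      rw [hrec]
      have e2 : y - (i + 1 - ind - k) = y - (d - k) - 1 := by omega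
      rw [e2]
    · rw [if_neg hkY, if_neg (fun hc => hkY (hyiff.mpr hc))]
  rw [hs1, hs2]

lemma fmtBuild_length (X Y d av bv nxtlo : Int) (nxt : List Int) (hi : Int) :
    ∀ (m : ℕ) (k0 : Int), (hi + 1 - k0).toNat = m →
      (fmtBuild X Y d av bv nxtlo nxt hi k0).length = (hi + 1 - k0).toNat := by
  intro m
  induction m with
  | zero =>
    intro k0 hm
    rw [fmtBuild, dif_pos (by omega : hi < k0)]
    simp [hm]
  | succ m ih =>
    intro k0 hm
    rw [fmtBuild, dif_neg (by omega : ¬ hi < k0)]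
    simp only [List.length_cons]
    rw [ih (k0 + 1) (by omega)]
    omega

lemma loop_inv (a b : List Int) (x y n ind X Y H : Int)
    (hX : X = if 0 < x then x else 0) (hY : Y = if 0 < y then y else 0)
    (hH : H = if n < ind + X + Y then n else ind + X + Y) :
    ∀ (m : ℕ) (i : Int), (i - ind + 1).toNat ≤ m → ind ≤ i → i ≤ H - 1 →
      ∀ (nxt : List Int) (lo0 : Int), InvL a b x y n ind X Y (i + 1) nxt lo0 →
        (fmtLoop a b ind X Y i nxt lo0).2 = 0 ∧
        (fmtLoop a b ind X Y i nxt lo0).1.length = 1 ∧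
        InvL a b x y n ind X Y ind (fmtLoop a b ind X Y i nxt lo0).1 0 := by
  have hX0 : 0 ≤ X := by split_ifs at hX <;> omega
  have hY0 : 0 ≤ Y := by split_ifs at hY <;> omega
  intro m
  induction m with
  | zero => intro i hm h1 h2; omega
  | succ m ih =>
    intro i hm hi1 hi2 nxt lo0 hinv
    rw [fmtLoop, dif_neg (by omega : ¬ i < ind)]
    simp only []
    have hstep0 := invL_step a b x y n ind X Y H hX hY hH i hi1 hi2 nxt lo0 hinv
    by_cases hend : i = ind
    · subst hend
      have hstep := invL_step a b x y n i X Y H hX hY hH i (le_refl i) hi2 nxt lo0 hinv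
      rw [fmtLoop, dif_pos (by omega : i - 1 < i)]
      have hlo : (if 0 < i - i - Y then i - i - Y else 0) = 0 := by rw [if_neg (by omega)]
      have hhi : (if i - i < X then i - i else X) = 0 := by
        rcases lt_or_ge (i - i) X with hc | hc
        · rw [if_pos hc]; omega
        · rw [if_neg (by omega)]; omega
      refine ⟨hlo, ?_, ?_⟩
      · show (fmtBuild X Y (i - i) _ _ lo0 nxt (if i - i < X then i - i else X) (if 0 < i - i - Y then i - i - Y else 0)).length = 1
        rw [fmtBuild_length X Y (i - i) _ _ lo0 nxt _ ((if i - i < X then i - i else X) + 1 - (if 0 < i - i - Y then i - i - Y else 0)).toNat (if 0 < i - i - Y then i - i - Y else 0) rfl]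
        rw [hlo, hhi]
        decide
      · show InvL a b x y n i X Y i (fmtBuild X Y (i - i) _ _ lo0 nxt (if i - i < X then i - i else X) (if 0 < i - i - Y then i - i - Y else 0)) 0
        rw [hlo] at hstep ⊢
        exact hstep
    · have := ih (i - 1) (by omega) (by omega) (by omega)
        (fmtBuild X Y (i - ind)
          (if (if 0 < i - ind - Y then i - ind - Y else 0) < X then (PySem.List.pyGet? a i).getD 0 else 0)
          (if (i - ind) - (if i - ind < X then i - ind else X) < Y then (PySem.List.pyGet? b i).getD 0 else 0)
          lo0 nxt (if i - ind < X then i - ind else X) (if 0 < i - ind - Y then i - ind - Y else 0))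
        (if 0 < i - ind - Y then i - ind - Y else 0)
        (by
          have he : i - 1 + 1 = i := by omega
          rw [he]
          exact hstep0)
      exact this

-- ===== VERDICT (by name: the statement is the Claim_ definition above) =====
theorem findmaxtip_spec : Claim_equal_findmaxtip := by
  intro a b x y n ind _ _
  unfold Spec_findmaxtip findmaxtip_alt
  simp only []
  set X : Int := if 0 < x then x else 0 with hX
  set Y : Int := if 0 < y then y else 0 with hY
  set H : Int := if n < ind + X + Y then n else ind + X + Y with hH
  have hX0 : 0 ≤ X := by split_ifs at hX <;> omega
  have hY0 : 0 ≤ Y := by split_ifs at hY <;> omega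
  by_cases hrun : ind ≤ H - 1
  · have hmain := loop_inv a b x y n ind X Y H hX hY hH (H - 1 - ind + 1).toNat (H - 1)
      (le_refl _) hrun (le_refl _) [] 0
      (by
        have he : H - 1 + 1 = H := by omega
        rw [he]
        exact invL_base a b x y n ind X Y H hX hY hH 0)
    obtain ⟨hz, hlen, hfin⟩ := hmain
    set r := fmtLoop a b ind X Y (H - 1) [] 0 with hr
    have hne : ¬ r.1 = [] := by
      intro hc
      rw [hc] at hlen
      simp at hlen
    rw [if_neg hne]
    have hk := hfin 0 (le_refl _) (by omega) (by omega) hX0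
    have : fmtLayerVal r.1 0 = (PySem.List.pyGet? r.1 (0 - r.2)).getD 0 := by
      rw [hz]
      simp only [fmtLayerVal]
      rw [if_pos (by constructor <;> [omega; (rw [hlen]; norm_num)])]
      norm_num
    rw [← this, ← sub_zero (0:Int), hk]
    have e1 : x - 0 = x := by omega
    have e2 : y - (ind - ind - 0) = y := by omega
    rw [e1, e2]
  · rw [fmtLoop, dif_pos (by omega : H - 1 < ind)]
    rw [if_pos rfl]
    refine f_zero a b x y n ind ?_
    by_cases hn : n ≤ ind
    · left; exact hn
    · right
      have : H = ind + X + Y ∨ H = n := by split_ifs at hH <;> omega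
      have hXY : X + Y ≤ 0 := by
        rcases this with h | h <;> omega
      constructor
      · split_ifs at hX <;> omega
      · split_ifs at hY <;> omega
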